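-- pv_equiv track=rewrite | github.com/Sparsene/Sparsene-SC26-AD | sparsene/python/sparsene/op_gen/nvir/pipeline/int_planner.py | generate_all_partitions_with_constraints
-- ===== SOURCE A (Python) =====
-- from itertools import permutations, product
-- from typing import List, Tuple
--
-- def is_valid_permutation(perm, constraints):
--     """
--     Check if a permutation satisfies the constraints.
--     Each constraint is a pair (m, n) meaning m must not appear after n.
--     """
--     for m, n in constraints:
--         if perm.index(m) > perm.index(n):  # If m appears after n, it's invalid
--             return False
--     return True
--
-- def generate_all_partitions_with_constraints(
--     m: int,
--     constraints: List[Tuple[int, int]],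
--     min_nstage: int,
--     max_nstage: int,
--     min_num_op_per_stage: int,
--     max_num_op_per_stage: int,
-- ):
--     # Generate all permutations of the elements 0, 1, ..., m-1
--     elements = list(range(m))
--     all_permutations = permutations(elements)
--
--     # Filter permutations based on the constraints
--     valid_permutations = filter(
--         lambda perm: is_valid_permutation(perm, constraints), all_permutations
--     )
--
--     # For each valid permutation, generate all possible ways to insert delimiters
--     results = []
--     for perm in valid_permutations:
--         # There are m-1 gaps between m elements, and each gap can either have a delimiter or not
--         num_gaps = m - 1
--         for delimiter_plan in product([0, 1], repeat=num_gaps):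
--             num_delimiters = sum(delimiter_plan)
--             if not min_nstage <= num_delimiters + 1 <= max_nstage:
--                 continue
--             partition = []
--             current_container = []
--             for i, elem in enumerate(perm):
--                 current_container.append(elem)
--                 # If there's a delimiter in this gap, start a new container
--                 if i < num_gaps and delimiter_plan[i] == 1:
--                     partition.append(current_container)
--                     current_container = []
--             # Add the last container
--             partition.append(current_container)
--
--             num_op_per_stage_oor = False
--             for stage in partition:
--                 if not min_num_op_per_stage <= len(stage) <= max_num_op_per_stage:
--                     num_op_per_stage_oor = True
--                     break
--             if num_op_per_stage_oor:
--                 continue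
--             results.append(partition)
--
--     return results
-- ===== SOURCE B (Python) =====
-- from itertools import permutations
--
--
-- def generate_all_partitions_with_constraints(
--     m,
--     constraints,
--     min_nstage,
--     max_nstage,
--     min_num_op_per_stage,
--     max_num_op_per_stage,
-- ):
--     results = []
--     for perm in permutations(range(m)):
--         # position index built once: O(1) lookups instead of repeated .index scans
--         pos = {v: i for i, v in enumerate(perm)}
--         if not all(pos[a] <= pos[b] for a, b in constraints):
--             continue
--
--         def walk(rest, cur, acc):
--             # walk the gaps left to right; 'no cut' explored before 'cut',
--             # which reproduces the lexicographic bitmask order of A.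
--             if not rest:
--                 stages = acc + [cur]
--                 if (min_nstage <= len(stages) <= max_nstage
--                         and all(min_num_op_per_stage <= len(s) <= max_num_op_per_stage
--                                 for s in stages)):
--                     results.append(stages)
--             else:
--                 walk(rest[1:], cur + [rest[0]], acc)        # no cut before rest[0]
--                 walk(rest[1:], [rest[0]], acc + [cur])      # cut before rest[0]
--
--         if perm:
--             walk(list(perm[1:]), [perm[0]], [])
--     return results
-- ===== Notes on version B (the rewrite author's own statement) =====
-- stated objective: alternative
-- what changed: The inner product([0,1],repeat=m-1) bitmask loop plus per-plan partition reconstruction is replaced by a recursive gap-walk that builds the stages directly (no-cut branch before cut branch, reproducing A's order), and the repeated perm.index scans in the constraint check are replaced by a position dictionary built once per permutation.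
-- outside the precondition, e.g. on generate_all_partitions_with_constraints(2, [(1, 0), (0, 1), (5, 5)], 1, 2, 1, 2): A returns [], B returns []
import Mathlib
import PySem

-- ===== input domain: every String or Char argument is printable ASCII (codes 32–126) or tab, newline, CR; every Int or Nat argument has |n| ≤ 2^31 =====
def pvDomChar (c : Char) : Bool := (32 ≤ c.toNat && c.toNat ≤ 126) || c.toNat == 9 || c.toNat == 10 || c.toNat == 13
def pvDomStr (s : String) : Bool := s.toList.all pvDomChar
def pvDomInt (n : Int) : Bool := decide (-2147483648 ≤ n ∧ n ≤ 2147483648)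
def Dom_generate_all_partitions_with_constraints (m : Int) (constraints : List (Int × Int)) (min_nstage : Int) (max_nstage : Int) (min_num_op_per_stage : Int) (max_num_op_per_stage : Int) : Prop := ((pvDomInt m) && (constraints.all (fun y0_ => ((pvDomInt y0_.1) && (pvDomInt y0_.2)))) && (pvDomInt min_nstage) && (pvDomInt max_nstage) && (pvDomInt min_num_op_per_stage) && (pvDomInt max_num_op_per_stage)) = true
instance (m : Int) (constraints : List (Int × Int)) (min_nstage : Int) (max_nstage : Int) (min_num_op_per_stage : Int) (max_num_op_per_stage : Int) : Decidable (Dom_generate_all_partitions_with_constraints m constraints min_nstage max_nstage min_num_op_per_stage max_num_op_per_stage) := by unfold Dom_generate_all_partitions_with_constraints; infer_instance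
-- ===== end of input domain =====

-- B replaces the bitmask (product) enumeration of delimiters by a recursive gap-walk that
-- builds the stages directly, and the repeated perm.index scans by a position dictionary
-- built once per permutation (objective: alternative decomposition, same enumeration order).

-- ===== PORT A =====
def is_valid_permutation (perm : List Int) (constraints : List (Int × Int)) : Bool :=
  match constraints with
  | [] => true
  | (a, b) :: rest =>
    if ((PySem.List.index? perm a).getD 0) > ((PySem.List.index? perm b).getD 0) then false
    else is_valid_permutation perm rest

-- port of itertools.product([0, 1], repeat=n): bit tuples in lexicographic order, first slot slowest
def pvProd01 : Nat → List (List Int)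
  | 0 => [[]]
  | n + 1 => (pvProd01 n).map (fun t => 0 :: t) ++ (pvProd01 n).map (fun t => 1 :: t)

def generate_all_partitions_with_constraints (m : Int) (constraints : List (Int × Int)) (min_nstage : Int) (max_nstage : Int) (min_num_op_per_stage : Int) (max_num_op_per_stage : Int) : List (List (List Int)) :=
  let elements := PySem.List.pyRange 0 m 1
  let all_permutations := PySem.List.permutations elements elements.length
  let valid_permutations := all_permutations.filter (fun perm => is_valid_permutation perm constraints)
  valid_permutations.foldl (fun results perm =>
    let num_gaps : Int := m - 1
    (pvProd01 (m - 1).toNat).foldl (fun results delimiter_plan =>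
      let num_delimiters := delimiter_plan.sum
      if ¬ (min_nstage ≤ num_delimiters + 1 ∧ num_delimiters + 1 ≤ max_nstage) then results
      else
        let st := (PySem.List.enumerate perm 0).foldl
          (fun (s : List (List Int) × List Int) ie =>
            let cur := s.2 ++ [ie.2]
            if ie.1 < num_gaps ∧ PySem.List.pyGetD delimiter_plan ie.1 0 = 1 then (s.1 ++ [cur], ([] : List Int))
            else (s.1, cur)) (([] : List (List Int)), ([] : List Int))
        let partition := st.1 ++ [st.2]
        let oor := partition.any (fun stage => decide (¬ (min_num_op_per_stage ≤ (stage.length : Int) ∧ (stage.length : Int) ≤ max_num_op_per_stage)))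
        if oor then results else results ++ [partition]) results) []

-- ===== PORT B =====
def pvPos (perm : List Int) : PySem.Dict Int Int :=
  (PySem.List.enumerate perm 0).foldl (fun d p => d.insert p.2 p.1) PySem.Dict.empty

def pvValid (perm : List Int) (constraints : List (Int × Int)) : Bool :=
  let pos := pvPos perm
  constraints.all (fun c => decide (pos.getD c.1 0 ≤ pos.getD c.2 0))

def pvStagesOk (min_nstage max_nstage min_num_op_per_stage max_num_op_per_stage : Int) (stages : List (List Int)) : Bool :=
  decide (min_nstage ≤ (stages.length : Int) ∧ (stages.length : Int) ≤ max_nstage) &&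
  stages.all (fun s => decide (min_num_op_per_stage ≤ (s.length : Int) ∧ (s.length : Int) ≤ max_num_op_per_stage))

def pvWalk (n1 n2 s1 s2 : Int) : List Int → List Int → List (List Int) → List (List (List Int))
  | [], cur, acc =>
    let stages := acc ++ [cur]
    if pvStagesOk n1 n2 s1 s2 stages then [stages] else []
  | x :: rest, cur, acc =>
    pvWalk n1 n2 s1 s2 rest (cur ++ [x]) acc ++ pvWalk n1 n2 s1 s2 rest [x] (acc ++ [cur])

def generate_all_partitions_with_constraints_alt (m : Int) (constraints : List (Int × Int)) (min_nstage : Int) (max_nstage : Int) (min_num_op_per_stage : Int) (max_num_op_per_stage : Int) : List (List (List Int)) :=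
  let elements := PySem.List.pyRange 0 m 1
  ((PySem.List.permutations elements elements.length).filter
      (fun perm => pvValid perm constraints)).flatMap
    (fun perm =>
      match perm with
      | [] => []
      | x :: rest => pvWalk min_nstage max_nstage min_num_op_per_stage max_num_op_per_stage rest [x] [])

-- ===== PRECONDITION & SPEC =====
-- Pre_ excludes m ≤ 0, on which A raises ValueError (negative product repeat, or perm.index on the
-- empty permutation), and constraint pairs with an element outside range(m), on which perm.index
-- raises ValueError for the permutations that reach that constraint (when an earlier constraint
-- always fails first A still returns []; one such excluded input is cited in claim.json).
def Pre_generate_all_partitions_with_constraints (m : Int) (constraints : List (Int × Int)) (min_nstage : Int) (max_nstage : Int) (min_num_op_per_stage : Int) (max_num_op_per_stage : Int) : Prop :=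
  1 ≤ m ∧ ∀ c ∈ constraints, 0 ≤ c.1 ∧ c.1 < m ∧ 0 ≤ c.2 ∧ c.2 < m
instance (m : Int) (constraints : List (Int × Int)) (min_nstage : Int) (max_nstage : Int) (min_num_op_per_stage : Int) (max_num_op_per_stage : Int) : Decidable (Pre_generate_all_partitions_with_constraints m constraints min_nstage max_nstage min_num_op_per_stage max_num_op_per_stage) := by unfold Pre_generate_all_partitions_with_constraints; infer_instance

def pvWitness_generate_all_partitions_with_constraints : Int × (List (Int × Int)) × Int × Int × Int × Int := (2, [(0, 1)], 1, 2, 1, 2)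

def Spec_generate_all_partitions_with_constraints (m : Int) (constraints : List (Int × Int)) (min_nstage : Int) (max_nstage : Int) (min_num_op_per_stage : Int) (max_num_op_per_stage : Int) (out : List (List (List Int))) : Prop := out = generate_all_partitions_with_constraints_alt m constraints min_nstage max_nstage min_num_op_per_stage max_num_op_per_stage
instance (m : Int) (constraints : List (Int × Int)) (min_nstage : Int) (max_nstage : Int) (min_num_op_per_stage : Int) (max_num_op_per_stage : Int) (out : List (List (List Int))) : Decidable (Spec_generate_all_partitions_with_constraints m constraints min_nstage max_nstage min_num_op_per_stage max_num_op_per_stage out) := by unfold Spec_generate_all_partitions_with_constraints; infer_instance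

-- ===== CLAIM (what is proved, stated in full; the proofs are below) =====
def Claim_equal_generate_all_partitions_with_constraints : Prop := ∀ (m : Int) (constraints : List (Int × Int)) (min_nstage : Int) (max_nstage : Int) (min_num_op_per_stage : Int) (max_num_op_per_stage : Int), Dom_generate_all_partitions_with_constraints m constraints min_nstage max_nstage min_num_op_per_stage max_num_op_per_stage → Pre_generate_all_partitions_with_constraints m constraints min_nstage max_nstage min_num_op_per_stage max_num_op_per_stage → Spec_generate_all_partitions_with_constraints m constraints min_nstage max_nstage min_num_op_per_stage max_num_op_per_stage (generate_all_partitions_with_constraints m constraints min_nstage max_nstage min_num_op_per_stage max_num_op_per_stage)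

-- ===== LEMMAS AND PROOFS =====

-- proof-side: B's stage decomposition of cur/xs directed by a bit list (cut BEFORE each element)
def pvSplit : List Int → List Int → List Int → List (List Int)
  | cur, [], _ => [cur]
  | cur, _ :: _, [] => [cur]
  | cur, x :: xs, b :: bs => if b = 1 then cur :: pvSplit [x] xs bs else pvSplit (cur ++ [x]) xs bs

-- proof-side: A's stage decomposition (cut AFTER element at global index j when plan[j] = 1)
def pvSplitA (plan : List Int) : Nat → List Int → List Int → List (List Int)
  | _, cur, [] => [cur]
  | j, cur, x :: xs =>
    if plan.getD j 0 = 1 then (cur ++ [x]) :: pvSplitA plan (j + 1) [] xs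
    else pvSplitA plan (j + 1) (cur ++ [x]) xs

theorem mem_pvProd01 {n : Nat} {plan : List Int} (h : plan ∈ pvProd01 n) :
    plan.length = n ∧ ∀ b ∈ plan, b = 0 ∨ b = 1 := by
  induction n generalizing plan with
  | zero => simp [pvProd01] at h; simp [h]
  | succ k ih =>
    simp only [pvProd01, List.mem_append, List.mem_map] at h
    rcases h with ⟨t, ht, rfl⟩ | ⟨t, ht, rfl⟩ <;>
      obtain ⟨hl, hb⟩ := ih ht <;>
      refine ⟨by simp [hl], ?_⟩ <;> intro b hb' <;> rcases List.mem_cons.mp hb' with rfl | hmem <;>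
        first | (left; rfl) | (right; rfl) | exact hb _ hmem

theorem pvSplit_length : ∀ (xs plan : List Int) (cur : List Int),
    plan.length = xs.length → (∀ b ∈ plan, b = 0 ∨ b = 1) →
    ((pvSplit cur xs plan).length : Int) = plan.sum + 1 := by
  intro xs
  induction xs with
  | nil => intro plan cur hl _; rw [List.length_nil, List.length_eq_zero_iff] at hl; subst hl; simp [pvSplit]
  | cons x xs ih =>
    intro plan cur hl hb
    cases plan with
    | nil => simp at hl
    | cons b bs =>
      simp only [List.length_cons, Nat.add_right_cancel_iff] at hl
      have hbs : ∀ c ∈ bs, c = 0 ∨ c = 1 := fun c hc => hb c (List.mem_cons_of_mem _ hc)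
      rcases hb b List.mem_cons_self with rfl | rfl
      · simp only [pvSplit, if_neg (by norm_num : ¬ (0 : Int) = 1), List.sum_cons]
        rw [ih bs (cur ++ [x]) hl hbs]; ring
      · rw [show pvSplit cur (x :: xs) (1 :: bs) = cur :: pvSplit [x] xs bs from by simp [pvSplit]]
        simp only [List.sum_cons, List.length_cons]
        push_cast
        rw [ih bs [x] hl hbs]; ring

theorem pvSplitA_eq (plan : List Int) :
    ∀ (xs : List Int) (j : Nat) (cur : List Int) (x : Int), j + xs.length = plan.length →
    pvSplitA plan j cur (x :: xs) = pvSplit (cur ++ [x]) xs (plan.drop j) := by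
  intro xs
  induction xs with
  | nil =>
    intro j cur x hj
    simp only [List.length_nil, Nat.add_zero] at hj
    have h0 : ¬ plan.getD j 0 = 1 := by
      rw [List.getD_eq_default _ _ (by omega : plan.length ≤ j)]; norm_num
    simp only [pvSplitA, if_neg h0]
    simp [pvSplit]
  | cons y ys ih =>
    intro j cur x hj
    have hjlt : j < plan.length := by simp at hj; omega
    rw [List.drop_eq_getElem_cons hjlt]
    have hgd : plan.getD j 0 = plan[j] := List.getD_eq_getElem _ _ hjlt
    have e1 : pvSplitA plan j cur (x :: y :: ys) =
        if plan.getD j 0 = 1 then (cur ++ [x]) :: pvSplitA plan (j + 1) [] (y :: ys)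
        else pvSplitA plan (j + 1) (cur ++ [x]) (y :: ys) := rfl
    have e2 : pvSplit (cur ++ [x]) (y :: ys) (plan[j] :: plan.drop (j + 1)) =
        if plan[j] = 1 then (cur ++ [x]) :: pvSplit [y] ys (plan.drop (j + 1))
        else pvSplit (cur ++ [x] ++ [y]) ys (plan.drop (j + 1)) := rfl
    rw [e1, e2, hgd, ih (j + 1) [] y (by simp at hj ⊢; omega),
        ih (j + 1) (cur ++ [x]) y (by simp at hj ⊢; omega)]
    simp

theorem pvFoldA (plan : List Int) (m : Int) (hpl : (plan.length : Int) = m - 1) :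
    ∀ (xs : List Int) (j : Nat) (part : List (List Int)) (cur : List Int),
    (let r := (PySem.List.enumerate xs (j : Int)).foldl
        (fun (s : List (List Int) × List Int) ie =>
          let c := s.2 ++ [ie.2]
          if ie.1 < m - 1 ∧ PySem.List.pyGetD plan ie.1 0 = 1 then (s.1 ++ [c], ([] : List Int))
          else (s.1, c)) (part, cur);
     r.1 ++ [r.2]) = part ++ pvSplitA plan j cur xs := by
  intro xs
  induction xs with
  | nil => intro j part cur; simp [PySem.List.enumerate_nil, pvSplitA]
  | cons x xs ih =>
    intro j part cur
    rw [PySem.List.enumerate_cons]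
    have hcast : (j : Int) + 1 = ((j + 1 : Nat) : Int) := by push_cast; ring
    have hcond : ((j : Int) < m - 1 ∧ PySem.List.pyGetD plan (j : Int) 0 = 1) ↔ plan.getD j 0 = 1 := by
      rw [PySem.List.pyGetD_natCast]
      constructor
      · rintro ⟨_, h⟩; exact h
      · intro h
        refine ⟨?_, h⟩
        by_cases hj : j < plan.length
        · omega
        · rw [List.getD_eq_default _ _ (by omega)] at h; norm_num at h
    by_cases hb : plan.getD j 0 = 1
    · have hc : ((j : Int) < m - 1 ∧ PySem.List.pyGetD plan (j : Int) 0 = 1) := hcond.mpr hb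
      simp only [List.foldl_cons, if_pos hc, hcast]
      rw [ih (j + 1) (part ++ [cur ++ [x]]) []]
      simp only [pvSplitA, if_pos hb, List.append_assoc, List.singleton_append]
    · have hc : ¬ ((j : Int) < m - 1 ∧ PySem.List.pyGetD plan (j : Int) 0 = 1) := fun h => hb (hcond.mp h)
      simp only [List.foldl_cons, if_neg hc, hcast]
      rw [ih (j + 1) part (cur ++ [x])]
      simp only [pvSplitA, if_neg hb]

theorem pvWalk_eq (n1 n2 s1 s2 : Int) :
    ∀ (xs cur : List Int) (acc : List (List Int)),
    pvWalk n1 n2 s1 s2 xs cur acc =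
      (pvProd01 xs.length).flatMap (fun bs =>
        let st := acc ++ pvSplit cur xs bs
        if pvStagesOk n1 n2 s1 s2 st then [st] else []) := by
  intro xs
  induction xs with
  | nil => intro cur acc; simp [pvWalk, pvProd01, pvSplit]
  | cons x rest ih =>
    intro cur acc
    have e1 : ∀ bs : List Int, pvSplit cur (x :: rest) (1 :: bs) = cur :: pvSplit [x] rest bs := by
      intro bs; simp [pvSplit]
    show pvWalk n1 n2 s1 s2 rest (cur ++ [x]) acc ++ pvWalk n1 n2 s1 s2 rest [x] (acc ++ [cur]) = _
    rw [ih (cur ++ [x]) acc, ih [x] (acc ++ [cur])]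
    simp only [List.length_cons, pvProd01, List.flatMap_append, List.flatMap_map]
    congr 1
    · apply List.flatMap_congr; intro bs _
      rw [e1 bs, show acc ++ cur :: pvSplit [x] rest bs = (acc ++ [cur]) ++ pvSplit [x] rest bs from by simp]

theorem pvPos_getD {p : List Int} (hnd : p.Nodup) {a : Int} (ha : a ∈ p) :
    (pvPos p).getD a 0 = (((PySem.List.index? p a).getD 0 : Nat) : Int) := by
  have hitems : (pvPos p).items = (PySem.List.enumerate p 0).map (fun q => (q.2, q.1)) := by
    have := PySem.Dict.items_foldl_insert_fresh (PySem.List.enumerate p 0)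
      (fun q => q.2) (fun q => q.1) PySem.Dict.empty
      (fun q _ => PySem.Dict.contains_empty _)
      (by rw [show (List.map (fun q => q.2) (PySem.List.enumerate p 0)) = p from PySem.List.map_snd_enumerate p 0]; exact hnd)
    simpa [pvPos] using this
  have hkeys : (pvPos p).keys = p := by
    show (pvPos p).items.map (·.1) = p
    rw [hitems, List.map_map]
    exact PySem.List.map_snd_enumerate p 0
  obtain ⟨k, hk⟩ := Option.isSome_iff_exists.mp ((PySem.List.index?_isSome_iff p a).mpr ha)
  obtain ⟨hklt, hget, _⟩ := PySem.List.getElem_of_index?_eq_some hk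
  have hmem : ((a, (k : Int)) : Int × Int) ∈ (pvPos p).items := by
    rw [hitems]
    refine List.mem_map.mpr ⟨((k : Int), a), ?_, rfl⟩
    rw [PySem.List.mem_enumerate_iff]
    exact ⟨k, hklt, by simp [hget]⟩
  rw [PySem.Dict.getD_of_mem_items _ hmem (by rw [hkeys]; exact hnd) 0, hk]
  simp

theorem pvValid_eq {m : Int} {p : List Int} (hnd : p.Nodup)
    (hmem : ∀ a : Int, a ∈ p ↔ (0 ≤ a ∧ a < m))
    (cs : List (Int × Int)) (hcs : ∀ c ∈ cs, 0 ≤ c.1 ∧ c.1 < m ∧ 0 ≤ c.2 ∧ c.2 < m) :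
    is_valid_permutation p cs = pvValid p cs := by
  induction cs with
  | nil => simp [is_valid_permutation, pvValid]
  | cons c rest ih =>
    obtain ⟨a, b⟩ := c
    obtain ⟨ha1, ha2, hb1, hb2⟩ := hcs (a, b) List.mem_cons_self
    have hrest : ∀ c ∈ rest, 0 ≤ c.1 ∧ c.1 < m ∧ 0 ≤ c.2 ∧ c.2 < m :=
      fun c hc => hcs c (List.mem_cons_of_mem _ hc)
    have hpa : (pvPos p).getD a 0 = (((PySem.List.index? p a).getD 0 : Nat) : Int) :=
      pvPos_getD hnd ((hmem a).mpr ⟨ha1, ha2⟩)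
    have hpb : (pvPos p).getD b 0 = (((PySem.List.index? p b).getD 0 : Nat) : Int) :=
      pvPos_getD hnd ((hmem b).mpr ⟨hb1, hb2⟩)
    show (if ((PySem.List.index? p a).getD 0) > ((PySem.List.index? p b).getD 0) then false
          else is_valid_permutation p rest) = pvValid p ((a, b) :: rest)
    have hall : pvValid p ((a, b) :: rest) =
        (decide ((pvPos p).getD a 0 ≤ (pvPos p).getD b 0) && pvValid p rest) := by
      simp [pvValid]
    rw [hall, hpa, hpb, ih hrest]
    by_cases hgt : ((PySem.List.index? p a).getD 0) > ((PySem.List.index? p b).getD 0)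
    · rw [if_pos hgt, decide_eq_false (by omega)]
      simp
    · rw [if_neg hgt, decide_eq_true (by omega)]
      simp

theorem pvPermFacts {m : Int} {p : List Int}
    (hp : p ∈ PySem.List.permutations (PySem.List.pyRange 0 m 1) (PySem.List.pyRange 0 m 1).length) :
    p.length = m.toNat ∧ p.Nodup ∧ ∀ a : Int, a ∈ p ↔ (0 ≤ a ∧ a < m) := by
  have hperm := PySem.List.perm_of_mem_permutations hp
  refine ⟨?_, ?_, ?_⟩
  · rw [hperm.length_eq, PySem.List.length_pyRange_one]; omega
  · exact hperm.nodup_iff.mpr (PySem.List.nodup_pyRange_one 0 m)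
  · intro a
    rw [hperm.mem_iff, PySem.List.mem_pyRange_one]

-- ===== VERDICT (by name: the statement is the Claim_ definition above) =====
theorem pvStep_eq (n1 n2 s1 s2 : Int) (P : List (List Int)) (nd : Int)
    (hsum : (P.length : Int) = nd + 1) (r : List (List (List Int))) :
    (if ¬ (n1 ≤ nd + 1 ∧ nd + 1 ≤ n2) then r
     else if P.any (fun stage => decide (¬ (s1 ≤ (stage.length : Int) ∧ (stage.length : Int) ≤ s2))) then r
     else r ++ [P]) =
    r ++ (if pvStagesOk n1 n2 s1 s2 P then [P] else []) := by
  rw [← hsum]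
  have hany : P.any (fun stage => decide (¬ (s1 ≤ (stage.length : Int) ∧ (stage.length : Int) ≤ s2))) =
      !(P.all (fun s => decide (s1 ≤ (s.length : Int) ∧ (s.length : Int) ≤ s2))) := by
    simp only [decide_not]
    exact (List.not_all_eq_any_not ..).symm
  rw [hany]
  unfold pvStagesOk
  by_cases h1 : (n1 ≤ (P.length : Int) ∧ (P.length : Int) ≤ n2)
  · rw [if_neg (not_not_intro h1), decide_eq_true h1, Bool.true_and]
    cases hall : P.all (fun s => decide (s1 ≤ (s.length : Int) ∧ (s.length : Int) ≤ s2)) with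
    | true => simp
    | false => simp
  · rw [if_pos h1, decide_eq_false h1, Bool.false_and, if_neg (by simp)]
    simp

theorem generate_all_partitions_with_constraints_spec : Claim_equal_generate_all_partitions_with_constraints := by
  intro m cs n1 n2 s1 s2 hdom hpre
  unfold Pre_generate_all_partitions_with_constraints at hpre
  obtain ⟨hm, hcs⟩ := hpre
  unfold Spec_generate_all_partitions_with_constraints
  unfold generate_all_partitions_with_constraints generate_all_partitions_with_constraints_alt
  have hfilter : (PySem.List.permutations (PySem.List.pyRange 0 m 1) (PySem.List.pyRange 0 m 1).length).filter
      (fun p => is_valid_permutation p cs) =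
      (PySem.List.permutations (PySem.List.pyRange 0 m 1) (PySem.List.pyRange 0 m 1).length).filter
      (fun p => pvValid p cs) := by
    apply List.filter_congr
    intro p hp
    obtain ⟨-, hnd, hmemp⟩ := pvPermFacts hp
    exact pvValid_eq hnd hmemp cs hcs
  dsimp only
  rw [hfilter]
  have houter : ∀ (r : List (List (List Int))), ∀ p ∈ (PySem.List.permutations (PySem.List.pyRange 0 m 1) (PySem.List.pyRange 0 m 1).length).filter (fun p => pvValid p cs),
      (pvProd01 (m - 1).toNat).foldl (fun results delimiter_plan =>
        if ¬ (n1 ≤ delimiter_plan.sum + 1 ∧ delimiter_plan.sum + 1 ≤ n2) then results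
        else
          if (((PySem.List.enumerate p 0).foldl
              (fun (s : List (List Int) × List Int) ie =>
                if ie.1 < m - 1 ∧ PySem.List.pyGetD delimiter_plan ie.1 0 = 1 then (s.1 ++ [s.2 ++ [ie.2]], ([] : List Int))
                else (s.1, s.2 ++ [ie.2])) (([] : List (List Int)), ([] : List Int))).1 ++
              [((PySem.List.enumerate p 0).foldl
              (fun (s : List (List Int) × List Int) ie =>
                if ie.1 < m - 1 ∧ PySem.List.pyGetD delimiter_plan ie.1 0 = 1 then (s.1 ++ [s.2 ++ [ie.2]], ([] : List Int))
                else (s.1, s.2 ++ [ie.2])) (([] : List (List Int)), ([] : List Int))).2]).any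
              (fun stage => decide (¬ (s1 ≤ (stage.length : Int) ∧ (stage.length : Int) ≤ s2))) then results
          else results ++ [((PySem.List.enumerate p 0).foldl
              (fun (s : List (List Int) × List Int) ie =>
                if ie.1 < m - 1 ∧ PySem.List.pyGetD delimiter_plan ie.1 0 = 1 then (s.1 ++ [s.2 ++ [ie.2]], ([] : List Int))
                else (s.1, s.2 ++ [ie.2])) (([] : List (List Int)), ([] : List Int))).1 ++
              [((PySem.List.enumerate p 0).foldl
              (fun (s : List (List Int) × List Int) ie =>
                if ie.1 < m - 1 ∧ PySem.List.pyGetD delimiter_plan ie.1 0 = 1 then (s.1 ++ [s.2 ++ [ie.2]], ([] : List Int))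
                else (s.1, s.2 ++ [ie.2])) (([] : List (List Int)), ([] : List Int))).2]]) r =
      r ++ (match p with
            | [] => []
            | x :: rest => pvWalk n1 n2 s1 s2 rest [x] []) := by
    intro r p hp
    have hpP := (List.mem_filter.mp hp).1
    obtain ⟨hlen, -, -⟩ := pvPermFacts hpP
    cases p with
    | nil => exfalso; simp at hlen; omega
    | cons x rest =>
      have hrl : (m - 1).toNat = rest.length := by simp at hlen; omega
      have hinner : ∀ (racc : List (List (List Int))), ∀ plan ∈ pvProd01 (m - 1).toNat,
          (if ¬ (n1 ≤ plan.sum + 1 ∧ plan.sum + 1 ≤ n2) then racc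
           else
            if (((PySem.List.enumerate (x :: rest) 0).foldl
                (fun (s : List (List Int) × List Int) ie =>
                  if ie.1 < m - 1 ∧ PySem.List.pyGetD plan ie.1 0 = 1 then (s.1 ++ [s.2 ++ [ie.2]], ([] : List Int))
                  else (s.1, s.2 ++ [ie.2])) (([] : List (List Int)), ([] : List Int))).1 ++
                [((PySem.List.enumerate (x :: rest) 0).foldl
                (fun (s : List (List Int) × List Int) ie =>
                  if ie.1 < m - 1 ∧ PySem.List.pyGetD plan ie.1 0 = 1 then (s.1 ++ [s.2 ++ [ie.2]], ([] : List Int))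
                  else (s.1, s.2 ++ [ie.2])) (([] : List (List Int)), ([] : List Int))).2]).any
                (fun stage => decide (¬ (s1 ≤ (stage.length : Int) ∧ (stage.length : Int) ≤ s2))) then racc
            else racc ++ [((PySem.List.enumerate (x :: rest) 0).foldl
                (fun (s : List (List Int) × List Int) ie =>
                  if ie.1 < m - 1 ∧ PySem.List.pyGetD plan ie.1 0 = 1 then (s.1 ++ [s.2 ++ [ie.2]], ([] : List Int))
                  else (s.1, s.2 ++ [ie.2])) (([] : List (List Int)), ([] : List Int))).1 ++
                [((PySem.List.enumerate (x :: rest) 0).foldl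
                (fun (s : List (List Int) × List Int) ie =>
                  if ie.1 < m - 1 ∧ PySem.List.pyGetD plan ie.1 0 = 1 then (s.1 ++ [s.2 ++ [ie.2]], ([] : List Int))
                  else (s.1, s.2 ++ [ie.2])) (([] : List (List Int)), ([] : List Int))).2]]) =
          racc ++ (fun bs =>
            let st := ([] : List (List Int)) ++ pvSplit [x] rest bs
            if pvStagesOk n1 n2 s1 s2 st then [st] else []) plan := by
        intro racc plan hplan
        obtain ⟨hplen, hbits⟩ := mem_pvProd01 hplan
        have hpl : (plan.length : Int) = m - 1 := by rw [hplen]; omega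
        have hpart := pvFoldA plan m hpl (x :: rest) 0 [] []
        rw [pvSplitA_eq plan rest 0 [] x (by rw [hplen]; omega)] at hpart
        simp only [Nat.cast_zero, List.nil_append, List.drop_zero] at hpart
        rw [hpart]
        simp only [List.nil_append]
        exact pvStep_eq n1 n2 s1 s2 (pvSplit [x] rest plan) plan.sum
          (pvSplit_length rest plan [x] (by omega) hbits) racc
      rw [PySem.List.foldl_congr_mem _ _
        (fun racc plan => racc ++ (fun bs =>
          let st := ([] : List (List Int)) ++ pvSplit [x] rest bs
          if pvStagesOk n1 n2 s1 s2 st then [st] else []) plan) _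
        (fun racc plan hplan => hinner racc plan hplan)]
      rw [PySem.List.foldl_append_eq_flatMap, hrl, ← pvWalk_eq]
  rw [PySem.List.foldl_congr_mem _ _
    (fun r p => r ++ (match p with
      | [] => []
      | x :: rest => pvWalk n1 n2 s1 s2 rest [x] [])) _
    (fun r p hp => houter r p hp)]
  rw [PySem.List.foldl_append_eq_flatMap]
  simp
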